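-- pv_equiv track=rewrite | github.com/ZelieM/MT-planting_planner | planner/compute_statistics.py | fill_missing_values_between_two_dict
-- ===== SOURCE A (Python) =====
-- def fill_missing_values_between_two_dict(dict1, dict2, default_value=None):
--     """
--     Compare the keys of the two given dictionaries and add the missing keys so
--     that they both have the same keys.
--     The missing keys are associated to the given default_value if provided.
--     If no default_value is provided, it uses the value from the dictionary
--     that has the key and copy it into the dictionary that misses the key.
--     """
--
--     for key_dict1 in dict1.keys():
--         if key_dict1 not in dict2:
--             dict2[key_dict1] = default_value if default_value is not None else dict1[key_dict1]
--     for key_dict2 in dict2.keys():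
--         if key_dict2 not in dict1:
--             dict1[key_dict2] = default_value if default_value is not None else dict2[key_dict2]
--     return dict1, dict2
-- ===== SOURCE B (Python) =====
-- def fill_missing_values_between_two_dict(dict1, dict2, default_value=None):
--     """Rebuild both result dicts from scratch in a single pass over the tagged
--     concatenation of the two item streams; a side accumulator collects dict2's
--     late additions so its key order is preserved.  Returns fresh dicts (does
--     not mutate the arguments, unlike the original)."""
--     res1, res2, extras2 = {}, {}, {}
--     tagged = [(k, v, True) for k, v in dict1.items()] + \
--              [(k, v, False) for k, v in dict2.items()]
--     for key, value, from_first in tagged: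
--         if from_first:
--             res1[key] = value
--             if key not in dict2:
--                 extras2[key] = default_value if default_value is not None else value
--         else:
--             res2[key] = value
--             if key not in res1:
--                 res1[key] = default_value if default_value is not None else value
--     res2.update(extras2)
--     return res1, res2
-- ===== Notes on version B (the rewrite author's own statement) =====
-- stated objective: alternative
-- what changed: B rebuilds both result dicts from scratch in one pass over a tagged concatenation of the two item streams, using a side accumulator for dict2's late additions, instead of A's two sequential mutate-while-iterating fill loops; B returns fresh dicts and does not mutate its arguments.
import Mathlib
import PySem

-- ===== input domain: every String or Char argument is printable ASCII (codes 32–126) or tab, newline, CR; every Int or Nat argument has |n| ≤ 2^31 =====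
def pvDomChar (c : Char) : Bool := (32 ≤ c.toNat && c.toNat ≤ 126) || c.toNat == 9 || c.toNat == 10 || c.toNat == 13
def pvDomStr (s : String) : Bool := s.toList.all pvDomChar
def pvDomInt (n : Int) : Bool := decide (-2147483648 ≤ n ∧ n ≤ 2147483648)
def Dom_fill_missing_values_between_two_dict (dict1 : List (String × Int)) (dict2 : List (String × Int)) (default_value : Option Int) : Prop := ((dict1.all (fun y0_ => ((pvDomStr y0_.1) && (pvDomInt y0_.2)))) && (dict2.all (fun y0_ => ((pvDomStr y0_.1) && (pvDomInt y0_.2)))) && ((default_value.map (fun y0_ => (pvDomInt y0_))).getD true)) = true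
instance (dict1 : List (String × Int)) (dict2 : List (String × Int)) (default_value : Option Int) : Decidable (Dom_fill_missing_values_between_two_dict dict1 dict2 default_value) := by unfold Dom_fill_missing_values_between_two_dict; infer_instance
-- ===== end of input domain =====

-- B rebuilds both result dicts from scratch in one pass over a tagged concatenation of the
-- two item streams (side accumulator for dict2's late additions) instead of A's two
-- sequential mutate-while-iterating fill loops (objective: alternative). Equivalence is
-- about the RETURNED pair only: Python A mutates its dict arguments in place, B does not.

-- ===== PORT A =====
-- the dict arguments are materialised as Python dicts (insertion order, last value for a
-- duplicate key wins, first position kept) exactly as dict(pairs) would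
def fill_missing_values_between_two_dict (dict1 : List (String × Int)) (dict2 : List (String × Int)) (default_value : Option Int) : (List (String × Int)) × (List (String × Int)) :=
  let d1 := PySem.Dict.ofList dict1
  let d2 := PySem.Dict.ofList dict2
  -- for key_dict1 in dict1.keys(): if key_dict1 not in dict2: dict2[key_dict1] = …
  let d2' := d1.keys.foldl (fun d k =>
      if d.contains k = false then
        d.insert k (match default_value with | some v => v | none => d1.getD k 0)
      else d) d2
  -- for key_dict2 in dict2.keys(): if key_dict2 not in dict1: dict1[key_dict2] = …
  let d1' := d2'.keys.foldl (fun d k =>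
      if d.contains k = false then
        d.insert k (match default_value with | some v => v | none => d2'.getD k 0)
      else d) d1
  (d1'.items, d2'.items)

-- ===== PORT B =====
-- one loop over the tagged concatenation of both item streams, accumulating
-- (res1, res2, extras2); then res2.update(extras2)
def fill_missing_values_between_two_dict_alt (dict1 : List (String × Int)) (dict2 : List (String × Int)) (default_value : Option Int) : (List (String × Int)) × (List (String × Int)) :=
  let d1 := PySem.Dict.ofList dict1
  let d2 := PySem.Dict.ofList dict2
  let tagged := d1.items.map (fun p => (p.1, p.2, true)) ++ d2.items.map (fun p => (p.1, p.2, false))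
  let st := tagged.foldl (fun (st : PySem.Dict String Int × PySem.Dict String Int × PySem.Dict String Int) t =>
      if t.2.2 then
        (st.1.insert t.1 t.2.1,
         st.2.1,
         if d2.contains t.1 = false then
           st.2.2.insert t.1 (match default_value with | some v => v | none => t.2.1)
         else st.2.2)
      else
        ((if st.1.contains t.1 = false then
            st.1.insert t.1 (match default_value with | some v => v | none => t.2.1)
          else st.1),
         st.2.1.insert t.1 t.2.1,
         st.2.2))
    (PySem.Dict.empty, PySem.Dict.empty, PySem.Dict.empty)
  let res2 := st.2.1.update st.2.2.items
  (st.1.items, res2.items)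

-- ===== PRECONDITION & SPEC =====
def Spec_fill_missing_values_between_two_dict (dict1 : List (String × Int)) (dict2 : List (String × Int)) (default_value : Option Int) (out : (List (String × Int)) × (List (String × Int))) : Prop := out = fill_missing_values_between_two_dict_alt dict1 dict2 default_value
instance (dict1 : List (String × Int)) (dict2 : List (String × Int)) (default_value : Option Int) (out : (List (String × Int)) × (List (String × Int))) : Decidable (Spec_fill_missing_values_between_two_dict dict1 dict2 default_value out) := by unfold Spec_fill_missing_values_between_two_dict; infer_instance

-- ===== CLAIM (what is proved, stated in full; the proofs are below) =====
def Claim_equal_fill_missing_values_between_two_dict : Prop := ∀ (dict1 : List (String × Int)) (dict2 : List (String × Int)) (default_value : Option Int), Dom_fill_missing_values_between_two_dict dict1 dict2 default_value → Spec_fill_missing_values_between_two_dict dict1 dict2 default_value (fill_missing_values_between_two_dict dict1 dict2 default_value)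

-- ===== LEMMAS AND PROOFS =====

-- value chosen for a missing key: default_value if provided, else the source dict's value
def pvVal (source : PySem.Dict String Int) (dv : Option Int) (k : String) : Int :=
  match dv with | some v => v | none => source.getD k 0

-- same, from an item's value
def pvValI (dv : Option Int) (v : Int) : Int :=
  match dv with | some w => w | none => v

-- canonical form of both programs' result
def pvOut (d1 d2 : PySem.Dict String Int) (dv : Option Int) :
    (List (String × Int)) × (List (String × Int)) :=
  (d1.items ++ (d2.keys.filter (fun k => !d1.contains k)).map (fun k => (k, pvVal d2 dv k)),
   d2.items ++ (d1.keys.filter (fun k => !d2.contains k)).map (fun k => (k, pvVal d1 dv k)))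

-- A's first loop as a named function (proof abbreviation only)
def pvLoop2 (d1 d2 : PySem.Dict String Int) (dv : Option Int) : PySem.Dict String Int :=
  d1.keys.foldl (fun d k => if d.contains k = false then d.insert k (pvVal d1 dv k) else d) d2

-- equal items lists give equal membership tests
lemma contains_of_items_eq (d e : PySem.Dict String Int) (h : d.items = e.items) (k : String) :
    d.contains k = e.contains k := by
  rw [PySem.Dict.contains_eq_decide_mem_keys, PySem.Dict.contains_eq_decide_mem_keys]
  simp only [PySem.Dict.keys, h]
  rfl

-- A's loop "for k in ks: if k not in d: d[k] = v k" appends exactly the missing keys of ks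
lemma fillLoop_items (ks : List String) (d : PySem.Dict String Int) (v : String → Int)
    (hnd : ks.Nodup) :
    (ks.foldl (fun d k => if d.contains k = false then d.insert k (v k) else d) d).items
      = d.items ++ (ks.filter (fun k => !d.contains k)).map (fun k => (k, v k)) := by
  induction ks generalizing d with
  | nil => simp
  | cons k ks ih =>
    simp only [List.nodup_cons] at hnd
    simp only [List.foldl_cons, List.filter_cons]
    by_cases hc : d.contains k = false
    · simp only [hc, Bool.not_false, if_true]
      rw [ih _ hnd.2, PySem.Dict.items_insert_of_not_contains _ _ hc]
      have hfilt : ks.filter (fun k' => !(d.insert k (v k)).contains k')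
          = ks.filter (fun k' => !d.contains k') := by
        apply List.filter_congr
        intro x hx
        have hne : x ≠ k := fun h => hnd.1 (h ▸ hx)
        simp [PySem.Dict.contains_insert, hne]
      rw [hfilt]
      simp
    · rw [if_neg hc, ih _ hnd.2]
      have : (!d.contains k) = false := by simp at hc ⊢; exact hc
      simp [this]

-- the same loop shape does not change the value stored at an already-present key
lemma fillLoop_getD (ks : List String) (d : PySem.Dict String Int) (v : String → Int)
    (k : String) (hk : d.contains k = true) :
    (ks.foldl (fun d k => if d.contains k = false then d.insert k (v k) else d) d).getD k 0
      = d.getD k 0 := by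
  induction ks generalizing d with
  | nil => rfl
  | cons k' ks ih =>
    simp only [List.foldl_cons]
    by_cases hc : d.contains k' = false
    · rw [if_pos hc]
      have hne : k ≠ k' := fun h => by rw [h] at hk; rw [hk] at hc; exact Bool.true_eq_false.mp hc
      rw [ih _ (by simp [PySem.Dict.contains_insert, hk]),
          PySem.Dict.getD_insert_of_ne _ _ _ hne]
    · rw [if_neg hc]; exact ih _ hk

-- B's fill-from-items loop appends exactly the pairs whose key is missing
lemma fillItems_items (l : List (String × Int)) (d : PySem.Dict String Int) (dv : Option Int)
    (hnd : (l.map Prod.fst).Nodup) :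
    (l.foldl (fun d p => if d.contains p.1 = false then d.insert p.1 (pvValI dv p.2) else d) d).items
      = d.items ++ (l.filter (fun p => !d.contains p.1)).map (fun p => (p.1, pvValI dv p.2)) := by
  induction l generalizing d with
  | nil => simp
  | cons p l ih =>
    simp only [List.map_cons, List.nodup_cons] at hnd
    simp only [List.foldl_cons, List.filter_cons]
    by_cases hc : d.contains p.1 = false
    · simp only [hc, Bool.not_false, if_true]
      rw [ih _ hnd.2, PySem.Dict.items_insert_of_not_contains _ _ hc]
      have hfilt : l.filter (fun q => !(d.insert p.1 (pvValI dv p.2)).contains q.1)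
          = l.filter (fun q => !d.contains q.1) := by
        apply List.filter_congr
        intro x hx
        have hne : x.1 ≠ p.1 := fun h => hnd.1 (h ▸ List.mem_map_of_mem hx)
        simp [PySem.Dict.contains_insert, hne]
      rw [hfilt]
      simp
    · rw [if_neg hc, ih _ hnd.2]
      have : (!d.contains p.1) = false := by simp at hc ⊢; exact hc
      simp [this]

-- materialising a pair list into a fresh dict keeps the items as they are
lemma insertFold_items (l : List (String × Int)) (hnd : (l.map Prod.fst).Nodup) :
    ((l.foldl (fun d p => d.insert p.1 p.2) (PySem.Dict.empty : PySem.Dict String Int)).items) = l := by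
  have := PySem.Dict.items_foldl_insert_fresh l Prod.fst Prod.snd PySem.Dict.empty
    (by intro a _; simp [PySem.Dict.contains_empty]) hnd
  simpa using this

-- a loop guarded by a condition that ignores the accumulator is a loop over the filtered list
lemma foldl_if_filter (d2 : PySem.Dict String Int) (g : String × Int → Int)
    (l : List (String × Int)) (d : PySem.Dict String Int) :
    l.foldl (fun d p => if d2.contains p.1 = false then d.insert p.1 (g p) else d) d
      = (l.filter (fun p => !d2.contains p.1)).foldl (fun d p => d.insert p.1 (g p)) d := by
  induction l generalizing d with
  | nil => rfl
  | cons p l ih =>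
    simp only [List.foldl_cons, List.filter_cons]
    by_cases hc : d2.contains p.1 = false
    · simp only [hc, Bool.not_false, if_true, List.foldl_cons]; exact ih _
    · have : (!d2.contains p.1) = false := by simp at hc ⊢; exact hc
      rw [if_neg hc, this]; simpa using ih _

-- the extras accumulator collects exactly dict1's pairs missing from dict2, in order
lemma extras_items (d2 : PySem.Dict String Int) (dv : Option Int) (l : List (String × Int))
    (hnd : (l.map Prod.fst).Nodup) :
    ((l.foldl (fun d p => if d2.contains p.1 = false then d.insert p.1 (pvValI dv p.2) else d)
        (PySem.Dict.empty : PySem.Dict String Int)).items)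
      = (l.filter (fun p => !d2.contains p.1)).map (fun p => (p.1, pvValI dv p.2)) := by
  rw [foldl_if_filter]
  have := PySem.Dict.items_foldl_insert_fresh (l.filter (fun p => !d2.contains p.1))
    Prod.fst (fun p => pvValI dv p.2) PySem.Dict.empty
    (by intro a _; simp [PySem.Dict.contains_empty])
    ((hnd.sublist (List.Sublist.map Prod.fst List.filter_sublist)))
  simpa using this

-- dict.update with fresh, distinct keys appends the pairs
lemma update_fresh_items (d : PySem.Dict String Int) (ps : List (String × Int))
    (hfresh : ∀ p ∈ ps, d.contains p.1 = false) (hnd : (ps.map Prod.fst).Nodup) :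
    (d.update ps).items = d.items ++ ps := by
  have := PySem.Dict.items_foldl_insert_fresh ps Prod.fst Prod.snd d hfresh hnd
  simpa [PySem.Dict.update] using this

-- items-based missing-pair list = keys-based missing-pair list
lemma filter_map_items (d dOther : PySem.Dict String Int) (dv : Option Int)
    (hnd : d.keys.Nodup) :
    (d.items.filter (fun p => !dOther.contains p.1)).map (fun p => (p.1, pvValI dv p.2))
      = (d.keys.filter (fun k => !dOther.contains k)).map (fun k => (k, pvVal d dv k)) := by
  rw [PySem.Dict.items_eq_map_keys d hnd 0, List.filter_map, List.map_map]
  apply List.map_congr_left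
  intro k hk
  have hk2 : k ∈ d.keys := (List.mem_filter.mp hk).1
  cases dv with
  | some v => rfl
  | none =>
    simp only [Function.comp_apply, pvValI, pvVal]

-- phase 1 of B's single pass: the true-tagged prefix
lemma phase1 (d2 : PySem.Dict String Int) (dv : Option Int) (l : List (String × Int))
    (s : PySem.Dict String Int × PySem.Dict String Int × PySem.Dict String Int) :
    (l.map (fun p => (p.1, p.2, true))).foldl
      (fun (st : PySem.Dict String Int × PySem.Dict String Int × PySem.Dict String Int) t =>
        if t.2.2 then
          (st.1.insert t.1 t.2.1,
           st.2.1,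
           if d2.contains t.1 = false then
             st.2.2.insert t.1 (match dv with | some v => v | none => t.2.1)
           else st.2.2)
        else
          ((if st.1.contains t.1 = false then
              st.1.insert t.1 (match dv with | some v => v | none => t.2.1)
            else st.1),
           st.2.1.insert t.1 t.2.1,
           st.2.2)) s
    = (l.foldl (fun d p => d.insert p.1 p.2) s.1,
       s.2.1,
       l.foldl (fun d p => if d2.contains p.1 = false then d.insert p.1 (pvValI dv p.2) else d) s.2.2) := by
  induction l generalizing s with
  | nil => rfl
  | cons p l ih =>
    simp only [List.map_cons, List.foldl_cons, if_true]
    rw [ih]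
    rfl

-- phase 2 of B's single pass: the false-tagged suffix
lemma phase2 (d2 : PySem.Dict String Int) (dv : Option Int) (l : List (String × Int))
    (s : PySem.Dict String Int × PySem.Dict String Int × PySem.Dict String Int) :
    (l.map (fun p => (p.1, p.2, false))).foldl
      (fun (st : PySem.Dict String Int × PySem.Dict String Int × PySem.Dict String Int) t =>
        if t.2.2 then
          (st.1.insert t.1 t.2.1,
           st.2.1,
           if d2.contains t.1 = false then
             st.2.2.insert t.1 (match dv with | some v => v | none => t.2.1)
           else st.2.2)
        else
          ((if st.1.contains t.1 = false then
              st.1.insert t.1 (match dv with | some v => v | none => t.2.1)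
            else st.1),
           st.2.1.insert t.1 t.2.1,
           st.2.2)) s
    = (l.foldl (fun d p => if d.contains p.1 = false then d.insert p.1 (pvValI dv p.2) else d) s.1,
       l.foldl (fun d p => d.insert p.1 p.2) s.2.1,
       s.2.2) := by
  induction l generalizing s with
  | nil => rfl
  | cons p l ih =>
    simp only [List.map_cons, List.foldl_cons, Bool.false_eq_true, if_false]
    rw [ih]
    rfl

-- A's second returned dict in canonical form
lemma snd_eq (d1 d2 : PySem.Dict String Int) (dv : Option Int)
    (hn1 : d1.keys.Nodup) :
    (pvLoop2 d1 d2 dv).items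
      = d2.items ++ (d1.keys.filter (fun k => !d2.contains k)).map (fun k => (k, pvVal d1 dv k)) := by
  rw [pvLoop2]; exact fillLoop_items _ _ _ hn1

-- A's first returned dict in canonical form
lemma fst_eq (d1 d2 : PySem.Dict String Int) (dv : Option Int)
    (hn1 : d1.keys.Nodup) (hn2 : d2.keys.Nodup) :
    ((pvLoop2 d1 d2 dv).keys.foldl
        (fun d k => if d.contains k = false then d.insert k (pvVal (pvLoop2 d1 d2 dv) dv k) else d)
        d1).items
      = d1.items ++ (d2.keys.filter (fun k => !d1.contains k)).map (fun k => (k, pvVal d2 dv k)) := by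
  have hF21mem : ∀ k ∈ d1.keys.filter (fun k => !d2.contains k),
      d2.contains k = false ∧ k ∈ d1.keys := by
    intro k hk
    rw [List.mem_filter] at hk
    exact ⟨by simpa using hk.2, hk.1⟩
  have hk2' : (pvLoop2 d1 d2 dv).keys
      = d2.keys ++ d1.keys.filter (fun k => !d2.contains k) := by
    have hitems := snd_eq d1 d2 dv hn1
    simp only [PySem.Dict.keys, hitems, List.map_append]
    congr 1
    simp [Function.comp_def]
  have hn2' : (pvLoop2 d1 d2 dv).keys.Nodup := by
    rw [hk2']
    refine List.Nodup.append hn2 (hn1.filter _) ?_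
    intro x hx hx'
    have hfalse := (hF21mem x hx').1
    rw [← PySem.Dict.contains_iff_mem_keys] at hx
    rw [hx] at hfalse
    exact Bool.true_eq_false.mp hfalse
  have hpres : ∀ k ∈ d2.keys, (pvLoop2 d1 d2 dv).getD k 0 = d2.getD k 0 := by
    intro k hk
    exact fillLoop_getD d1.keys d2 _ k ((PySem.Dict.contains_iff_mem_keys d2 k).mpr hk)
  rw [fillLoop_items _ _ _ hn2']
  congr 1
  rw [hk2', List.filter_append]
  have hdrop : (d1.keys.filter (fun k => !d2.contains k)).filter (fun k => !d1.contains k)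
      = [] := by
    rw [List.filter_eq_nil_iff]
    intro x hx
    have hmem := (hF21mem x hx).2
    rw [← PySem.Dict.contains_iff_mem_keys] at hmem
    simp [hmem]
  rw [hdrop, List.append_nil]
  apply List.map_congr_left
  intro k hk
  have hk2 : k ∈ d2.keys := (List.mem_filter.mp hk).1
  cases dv with
  | some v => rfl
  | none => simp [pvVal, hpres k hk2]

-- A in canonical form
lemma A_items (dict1 dict2 : List (String × Int)) (dv : Option Int) :
    fill_missing_values_between_two_dict dict1 dict2 dv
      = pvOut (PySem.Dict.ofList dict1) (PySem.Dict.ofList dict2) dv := by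
  unfold fill_missing_values_between_two_dict pvOut
  exact Prod.ext
    (fst_eq (PySem.Dict.ofList dict1) (PySem.Dict.ofList dict2) dv
      (PySem.Dict.nodup_keys_ofList dict1) (PySem.Dict.nodup_keys_ofList dict2))
    (snd_eq (PySem.Dict.ofList dict1) (PySem.Dict.ofList dict2) dv
      (PySem.Dict.nodup_keys_ofList dict1))

-- B in canonical form
lemma B_items (dict1 dict2 : List (String × Int)) (dv : Option Int) :
    fill_missing_values_between_two_dict_alt dict1 dict2 dv
      = pvOut (PySem.Dict.ofList dict1) (PySem.Dict.ofList dict2) dv := by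
  unfold fill_missing_values_between_two_dict_alt pvOut
  have hn1 : (PySem.Dict.ofList dict1).keys.Nodup := PySem.Dict.nodup_keys_ofList dict1
  have hn2 : (PySem.Dict.ofList dict2).keys.Nodup := PySem.Dict.nodup_keys_ofList dict2
  have hn1' : ((PySem.Dict.ofList dict1).items.map Prod.fst).Nodup := by
    simpa [PySem.Dict.keys] using hn1
  have hn2' : ((PySem.Dict.ofList dict2).items.map Prod.fst).Nodup := by
    simpa [PySem.Dict.keys] using hn2
  have hR1 : ((PySem.Dict.ofList dict1).items.foldl (fun d p => d.insert p.1 p.2)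
      (PySem.Dict.empty : PySem.Dict String Int)).items = (PySem.Dict.ofList dict1).items :=
    insertFold_items _ hn1'
  have hR2 : ((PySem.Dict.ofList dict2).items.foldl (fun d p => d.insert p.1 p.2)
      (PySem.Dict.empty : PySem.Dict String Int)).items = (PySem.Dict.ofList dict2).items :=
    insertFold_items _ hn2'
  have hcont1 : ∀ k, ((PySem.Dict.ofList dict1).items.foldl (fun d p => d.insert p.1 p.2)
      (PySem.Dict.empty : PySem.Dict String Int)).contains k = (PySem.Dict.ofList dict1).contains k :=
    fun k => contains_of_items_eq _ _ hR1 k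
  have hcont2 : ∀ k, ((PySem.Dict.ofList dict2).items.foldl (fun d p => d.insert p.1 p.2)
      (PySem.Dict.empty : PySem.Dict String Int)).contains k = (PySem.Dict.ofList dict2).contains k :=
    fun k => contains_of_items_eq _ _ hR2 k
  refine Prod.ext ?_ ?_
  · -- first component
    show ((((PySem.Dict.ofList dict1).items.map (fun p => (p.1, p.2, true)) ++
        (PySem.Dict.ofList dict2).items.map (fun p => (p.1, p.2, false))).foldl
      (fun (st : PySem.Dict String Int × PySem.Dict String Int × PySem.Dict String Int) t =>
        if t.2.2 then
          (st.1.insert t.1 t.2.1,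
           st.2.1,
           if (PySem.Dict.ofList dict2).contains t.1 = false then
             st.2.2.insert t.1 (match dv with | some v => v | none => t.2.1)
           else st.2.2)
        else
          ((if st.1.contains t.1 = false then
              st.1.insert t.1 (match dv with | some v => v | none => t.2.1)
            else st.1),
           st.2.1.insert t.1 t.2.1,
           st.2.2))
      (PySem.Dict.empty, PySem.Dict.empty, PySem.Dict.empty)).1).items
      = (PySem.Dict.ofList dict1).items ++
        ((PySem.Dict.ofList dict2).keys.filter (fun k => !(PySem.Dict.ofList dict1).contains k)).map
          (fun k => (k, pvVal (PySem.Dict.ofList dict2) dv k))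
    rw [List.foldl_append, phase1, phase2]
    dsimp only
    rw [fillItems_items _ _ _ hn2', hR1]
    congr 1
    have hfilt : (PySem.Dict.ofList dict2).items.filter
        (fun p => !((PySem.Dict.ofList dict1).items.foldl (fun d p => d.insert p.1 p.2)
          (PySem.Dict.empty : PySem.Dict String Int)).contains p.1)
        = (PySem.Dict.ofList dict2).items.filter (fun p => !(PySem.Dict.ofList dict1).contains p.1) := by
      apply List.filter_congr
      intro x _
      rw [hcont1]
    rw [hfilt, filter_map_items _ _ _ hn2]
  · -- second component
    show (((((PySem.Dict.ofList dict1).items.map (fun p => (p.1, p.2, true)) ++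
        (PySem.Dict.ofList dict2).items.map (fun p => (p.1, p.2, false))).foldl
      (fun (st : PySem.Dict String Int × PySem.Dict String Int × PySem.Dict String Int) t =>
        if t.2.2 then
          (st.1.insert t.1 t.2.1,
           st.2.1,
           if (PySem.Dict.ofList dict2).contains t.1 = false then
             st.2.2.insert t.1 (match dv with | some v => v | none => t.2.1)
           else st.2.2)
        else
          ((if st.1.contains t.1 = false then
              st.1.insert t.1 (match dv with | some v => v | none => t.2.1)
            else st.1),
           st.2.1.insert t.1 t.2.1,
           st.2.2))
      (PySem.Dict.empty, PySem.Dict.empty, PySem.Dict.empty)).2.1.update ((((PySem.Dict.ofList dict1).items.map (fun p => (p.1, p.2, true)) ++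
        (PySem.Dict.ofList dict2).items.map (fun p => (p.1, p.2, false))).foldl
      (fun (st : PySem.Dict String Int × PySem.Dict String Int × PySem.Dict String Int) t =>
        if t.2.2 then
          (st.1.insert t.1 t.2.1,
           st.2.1,
           if (PySem.Dict.ofList dict2).contains t.1 = false then
             st.2.2.insert t.1 (match dv with | some v => v | none => t.2.1)
           else st.2.2)
        else
          ((if st.1.contains t.1 = false then
              st.1.insert t.1 (match dv with | some v => v | none => t.2.1)
            else st.1),
           st.2.1.insert t.1 t.2.1,
           st.2.2))
      (PySem.Dict.empty, PySem.Dict.empty, PySem.Dict.empty)).2.2.items)).items)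
      = (PySem.Dict.ofList dict2).items ++
        ((PySem.Dict.ofList dict1).keys.filter (fun k => !(PySem.Dict.ofList dict2).contains k)).map
          (fun k => (k, pvVal (PySem.Dict.ofList dict1) dv k))
    rw [List.foldl_append, phase1, phase2]
    dsimp only
    rw [extras_items _ _ _ hn1', update_fresh_items, hR2, filter_map_items _ _ _ hn1]
    · intro p hp
      rcases List.mem_map.mp hp with ⟨q, hq, rfl⟩
      rw [hcont2]
      simpa using (List.mem_filter.mp hq).2
    · have hmapfst : (((PySem.Dict.ofList dict1).items.filter
          (fun p => !(PySem.Dict.ofList dict2).contains p.1)).map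
            (fun p => (p.1, pvValI dv p.2))).map Prod.fst
          = ((PySem.Dict.ofList dict1).items.filter
              (fun p => !(PySem.Dict.ofList dict2).contains p.1)).map Prod.fst := by
        simp [Function.comp_def]
      rw [hmapfst]
      exact hn1'.sublist (List.Sublist.map Prod.fst List.filter_sublist)

-- ===== VERDICT (by name: the statement is the Claim_ definition above) =====
theorem fill_missing_values_between_two_dict_spec : Claim_equal_fill_missing_values_between_two_dict := by
  intro dict1 dict2 dv _
  unfold Spec_fill_missing_values_between_two_dict
  rw [A_items, B_items]
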